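-- pv_equiv track=rewrite | github.com/andreu7d/cryptography-algorithms | sha256/utils.py | hexify
-- ===== SOURCE A (Python) =====
-- def hexify(value):
--     value = "".join([str(x) for x in value])
--     binaries = []
--     for d in range(0, len(value), 4):
--         binaries.append(f"0b{value[d:d+4]}")
--     hexes = ""
--     for b in binaries:
--         hexes += hex(int(b, 2))[2:]
--     return hexes
-- ===== SOURCE B (Python) =====
-- def hexify(value):
--     value = "".join(str(x) for x in value)
--     parts = []
--     acc = 0
--     cnt = 0
--     for ch in value:
--         acc = acc * 2 + int(ch, 2)
--         cnt += 1
--         if cnt == 4: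
--             parts.append(hex(acc)[2:])
--             acc = 0
--             cnt = 0
--     if cnt > 0:
--         parts.append(hex(acc)[2:])
--     return "".join(parts)
-- ===== Notes on version B (the rewrite author's own statement) =====
-- stated objective: alternative
-- what changed: Replaces A's two-pass slice-into-4-char-chunks-then-convert scheme with a single left-to-right streaming scan maintaining a running accumulator acc=acc*2+bit and a bit counter, emitting one hex digit whenever 4 bits are collected and flushing the short final group.
import Mathlib
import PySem

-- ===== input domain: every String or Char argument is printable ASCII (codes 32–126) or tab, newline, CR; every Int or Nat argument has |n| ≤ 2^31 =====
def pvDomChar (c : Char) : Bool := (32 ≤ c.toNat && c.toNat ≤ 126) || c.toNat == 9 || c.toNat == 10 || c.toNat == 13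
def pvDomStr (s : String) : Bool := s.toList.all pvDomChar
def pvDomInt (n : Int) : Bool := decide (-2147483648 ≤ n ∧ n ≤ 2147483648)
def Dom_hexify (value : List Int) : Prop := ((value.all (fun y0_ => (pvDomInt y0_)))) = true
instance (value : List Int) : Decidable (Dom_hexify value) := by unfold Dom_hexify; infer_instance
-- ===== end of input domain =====

-- B replaces A's slice-into-4-char-chunks pass by a single streaming scan with a bit accumulator; same cost, different decomposition.


-- shared helpers (the identical Python fragments of A and B): "".join(str(x) for x in value) and hex(n)[2:]
def pvJoinStr (value : List Int) : List Char := PySem.Chars.join [] (value.map PySem.Int.toChars)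

def pvHexDigit (n : Nat) : Char :=
  (['0','1','2','3','4','5','6','7','8','9','a','b','c','d','e','f']).getD n '0'

-- hex(n)[2:] for n ≥ 0 (the only case reached: int(_, 2) of a binary digit group is ≥ 0)
def pvHexChars (n : Nat) : List Char :=
  if _h : n < 16 then [pvHexDigit n]
  else pvHexChars (n / 16) ++ [pvHexDigit (n % 16)]
decreasing_by exact Nat.div_lt_self (by omega) (by omega)

-- ===== PORT A =====
-- hex(int(b, 2))[2:]; int(b, 2) = none is the ValueError case, excluded by Pre_
def pvHexTerm (b : List Char) : List Char :=
  match PySem.Int.ofCharsBase? b 2 with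
  | some v => pvHexChars v.toNat
  | none => []

def hexify (value : List Int) : String :=
  let s := pvJoinStr value
  let binaries := (PySem.List.pyRange 0 (s.length : Int) 4).map
    (fun d => ['0','b'] ++ PySem.List.slice s (some d) (some (d + 4)))
  String.ofList (binaries.foldl (fun h b => h ++ pvHexTerm b) [])

-- ===== PORT B =====
-- one streaming step: acc = acc*2 + int(ch, 2); cnt += 1; on cnt == 4 emit hex(acc)[2:] and reset
-- (int(ch, 2) = none is the ValueError case, excluded by Pre_; the state is left unchanged there)
def pvStep (st : List (List Char) × Int × Int) (ch : Char) : List (List Char) × Int × Int :=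
  match PySem.Int.ofCharsBase? [ch] 2 with
  | some d =>
    let acc := st.2.1 * 2 + d
    let cnt := st.2.2 + 1
    if cnt == 4 then (st.1 ++ [pvHexChars acc.toNat], 0, 0) else (st.1, acc, cnt)
  | none => st

def hexify_alt (value : List Int) : String :=
  let s := pvJoinStr value
  let st := s.foldl pvStep ([], 0, 0)
  let parts := if st.2.2 > 0 then st.1 ++ [pvHexChars st.2.1.toNat] else st.1
  String.ofList (PySem.Chars.join [] parts)

-- ===== PRECONDITION & SPEC =====
def pvBinChar (c : Char) : Bool := c == '0' || c == '1'

-- Pre_ excludes exactly the inputs where int(…, 2) raises ValueError in A (and likewise in B):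
-- some element's decimal representation str(x) contains a character other than '0'/'1'.
def Pre_hexify (value : List Int) : Prop :=
  (value.all (fun x => (PySem.Int.toChars x).all pvBinChar)) = true
instance (value : List Int) : Decidable (Pre_hexify value) := by unfold Pre_hexify; infer_instance

def pvWitness_hexify : List Int := [1, 0, 1, 1]

def Spec_hexify (value : List Int) (out : String) : Prop := out = hexify_alt value
instance (value : List Int) (out : String) : Decidable (Spec_hexify value out) := by unfold Spec_hexify; infer_instance

-- ===== CLAIM (what is proved, stated in full; the proofs are below) =====
def Claim_equal_hexify : Prop := ∀ (value : List Int), Dom_hexify value → Pre_hexify value → Spec_hexify value (hexify value)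

-- ===== LEMMAS AND PROOFS =====

-- value of a group of binary digit characters
def pvBits (cs : List Char) : Nat :=
  cs.foldl (fun a c => a * 2 + (if c = '1' then 1 else 0)) 0

-- the 4-character groups of a string, left to right, last one possibly short
def pvChunks : List Char → List (List Char)
  | [] => []
  | c :: cs => ((c :: cs).take 4) :: pvChunks ((c :: cs).drop 4)
termination_by l => l.length
decreasing_by simp

-- the flush at the end of B's loop
def pvFinish (st : List (List Char) × Int × Int) : List (List Char) :=
  if st.2.2 > 0 then st.1 ++ [pvHexChars st.2.1.toNat] else st.1

theorem pvRange4_single (n : Int) (h0 : 0 < n) (h4 : n ≤ 4) : PySem.List.pyRange 0 n 4 = [0] := by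
  rw [PySem.List.pyRange_of_pos 0 n (by norm_num)]
  rw [if_pos h0]
  have : ((n - 0 + 4 - 1) / 4).toNat = 1 := by omega
  rw [this]
  simp [List.range_succ]

theorem pvRange4_step (n : Int) (h : 4 < n) :
    PySem.List.pyRange 0 n 4 = 0 :: (PySem.List.pyRange 0 (n - 4) 4).map (· + 4) := by
  rw [PySem.List.pyRange_of_pos 0 n (by norm_num), PySem.List.pyRange_of_pos 0 (n - 4) (by norm_num)]
  rw [if_pos (by omega : (0:Int) < n), if_pos (by omega : (0:Int) < n - 4)]
  have h1 : ((n - 0 + 4 - 1) / 4).toNat = ((n - 4 - 0 + 4 - 1) / 4).toNat + 1 := by omega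
  rw [h1, List.range_succ_eq_map]
  simp only [List.map_cons, List.map_map, Function.comp_def]
  congr 1

theorem pv_join_nil_sep (l : List (List Char)) : PySem.Chars.join [] l = l.flatten := by
  induction l with
  | nil => simp [PySem.Chars.join_nil]
  | cons a t ih =>
    cases t with
    | nil => simp [PySem.Chars.join_singleton]
    | cons b r => rw [PySem.Chars.join_cons_cons] at *; simp [ih]

theorem pv_ofBase2_chunk (cs : List Char) (h : cs.all pvBinChar = true)
    (hlen : cs.length ≤ 4) (hne : cs ≠ []) :
    PySem.Int.ofCharsBase? ('0' :: 'b' :: cs) 2 = some ((pvBits cs : Nat) : Int) := by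
  rcases cs with _ | ⟨c1, _ | ⟨c2, _ | ⟨c3, _ | ⟨c4, _ | ⟨c5, r⟩⟩⟩⟩⟩
  · cases hne rfl
  · simp [pvBinChar] at h
    rcases h with rfl | rfl <;> decide
  · simp [pvBinChar] at h
    obtain ⟨h1, h2⟩ := h
    rcases h1 with rfl | rfl <;> rcases h2 with rfl | rfl <;> decide
  · simp [pvBinChar] at h
    obtain ⟨h1, h2, h3⟩ := h
    rcases h1 with rfl | rfl <;> rcases h2 with rfl | rfl <;> rcases h3 with rfl | rfl <;> decide
  · simp [pvBinChar] at h
    obtain ⟨h1, h2, h3, h4⟩ := h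
    rcases h1 with rfl | rfl <;> rcases h2 with rfl | rfl <;> rcases h3 with rfl | rfl <;>
      rcases h4 with rfl | rfl <;> decide
  · simp at hlen; omega

theorem pv_e0 : PySem.Int.ofCharsBase? ['0'] 2 = some 0 := by decide
theorem pv_e1 : PySem.Int.ofCharsBase? ['1'] 2 = some 1 := by decide

theorem pv_chunk4 (c1 c2 c3 c4 : Char)
    (h1 : pvBinChar c1 = true) (h2 : pvBinChar c2 = true)
    (h3 : pvBinChar c3 = true) (h4 : pvBinChar c4 = true)
    (parts : List (List Char)) (rest : List Char) :
    List.foldl pvStep (parts, 0, 0) (c1 :: c2 :: c3 :: c4 :: rest)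
      = List.foldl pvStep (parts ++ [pvHexChars (pvBits [c1, c2, c3, c4])], 0, 0) rest := by
  simp [pvBinChar] at h1 h2 h3 h4
  rcases h1 with rfl | rfl <;> rcases h2 with rfl | rfl <;> rcases h3 with rfl | rfl <;>
    rcases h4 with rfl | rfl <;> rfl

theorem pv_B_core (fuel : Nat) : ∀ (s : List Char), s.length ≤ fuel → s.all pvBinChar = true →
    ∀ (parts : List (List Char)),
    pvFinish (s.foldl pvStep (parts, 0, 0))
      = parts ++ (pvChunks s).map (fun c => pvHexChars (pvBits c)) := by
  induction fuel with
  | zero =>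
    intro s hs _ parts
    have : s = [] := by cases s <;> simp_all
    subst this
    simp [pvFinish, pvChunks]
  | succ n ih =>
    intro s hs hbin parts
    rcases s with _ | ⟨c1, _ | ⟨c2, _ | ⟨c3, _ | ⟨c4, rest⟩⟩⟩⟩
    · simp [pvFinish, pvChunks]
    · simp [pvBinChar] at hbin
      rcases hbin with rfl | rfl <;> simp [pvFinish, pvStep, pvChunks, pvBits, pv_e0, pv_e1]
    · simp [pvBinChar] at hbin
      obtain ⟨h1, h2⟩ := hbin
      rcases h1 with rfl | rfl <;> rcases h2 with rfl | rfl <;>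
        simp [pvFinish, pvStep, pvChunks, pvBits, pv_e0, pv_e1]
    · simp [pvBinChar] at hbin
      obtain ⟨h1, h2, h3⟩ := hbin
      rcases h1 with rfl | rfl <;> rcases h2 with rfl | rfl <;> rcases h3 with rfl | rfl <;>
        simp [pvFinish, pvStep, pvChunks, pvBits, pv_e0, pv_e1]
    · simp only [List.all_cons, Bool.and_eq_true] at hbin
      obtain ⟨h1, h2, h3, h4, hrest⟩ := hbin
      rw [pv_chunk4 c1 c2 c3 c4 h1 h2 h3 h4]
      rw [ih rest (by simp at hs ⊢; omega) hrest]
      simp [pvChunks]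

theorem pv_all_sub {p : Char → Bool} {s t : List Char} (hsub : ∀ c, c ∈ t → c ∈ s)
    (h : s.all p = true) : t.all p = true := by
  simp only [List.all_eq_true] at *
  exact fun c hc => h c (hsub c hc)

theorem pv_head_term (s : List Char) (hbin : s.all pvBinChar = true) (hne : s ≠ []) :
    pvHexTerm (['0','b'] ++ PySem.List.slice s (some 0) (some (0 + 4)))
      = pvHexChars (pvBits (s.take 4)) := by
  have hslice : PySem.List.slice s (some 0) (some (0 + 4)) = s.take 4 := by
    rw [PySem.List.slice_toNat s (by norm_num) (by norm_num)]
    rfl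
  rw [hslice]
  have htake : (s.take 4).all pvBinChar = true :=
    pv_all_sub (fun c hc => List.mem_of_mem_take hc) hbin
  have hlen : (s.take 4).length ≤ 4 := by simp
  have hne4 : s.take 4 ≠ [] := by
    cases s with
    | nil => cases hne rfl
    | cons a t => simp
  show pvHexTerm ('0' :: 'b' :: s.take 4) = _
  unfold pvHexTerm
  rw [pv_ofBase2_chunk _ htake hlen hne4]
  simp

theorem pv_A_core (fuel : Nat) : ∀ (s : List Char), s.length ≤ fuel → s.all pvBinChar = true →
    ((PySem.List.pyRange 0 (s.length : Int) 4).map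
      (fun d => ['0','b'] ++ PySem.List.slice s (some d) (some (d + 4)))).foldl
        (fun h b => h ++ pvHexTerm b) []
      = ((pvChunks s).map (fun c => pvHexChars (pvBits c))).flatten := by
  induction fuel with
  | zero =>
    intro s hs _
    have : s = [] := by cases s <;> simp_all
    subst this
    simp [pvChunks, PySem.List.pyRange]
  | succ n ih =>
    intro s hs hbin
    by_cases hne : s = []
    · subst hne
      simp [pvChunks, PySem.List.pyRange]
    have hpos : (0 : Int) < (s.length : Int) := by
      have := List.length_pos_of_ne_nil hne
      exact_mod_cast this
    rw [PySem.List.foldl_append_eq_flatMap, List.nil_append, List.flatMap_map]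
    by_cases h4 : (s.length : Int) ≤ 4
    · rw [pvRange4_single _ hpos h4]
      have hchunks : pvChunks s = [s] := by
        cases s with
        | nil => cases hne rfl
        | cons a t =>
          have hd : (a :: t).drop 4 = [] := List.drop_eq_nil_of_le (by exact_mod_cast h4)
          have ht : (a :: t).take 4 = a :: t := List.take_of_length_le (by exact_mod_cast h4)
          rw [pvChunks, hd, ht, pvChunks]
      rw [hchunks]
      simp only [List.flatMap_cons, List.flatMap_nil, List.append_nil, List.map_cons,
        List.map_nil, List.flatten_cons, List.flatten_nil, List.append_nil]
      rw [pv_head_term s hbin hne, List.take_of_length_le (by exact_mod_cast h4)]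
    · rw [pvRange4_step _ (by omega)]
      rw [List.flatMap_cons, List.flatMap_map]
      have hdlen : ((s.drop 4).length : Int) = (s.length : Int) - 4 := by
        simp; omega
      have hdbin : (s.drop 4).all pvBinChar = true :=
        pv_all_sub (fun c hc => List.mem_of_mem_drop hc) hbin
      have hIH := ih (s.drop 4) (by simp at hs ⊢; omega) hdbin
      rw [PySem.List.foldl_append_eq_flatMap, List.nil_append, List.flatMap_map] at hIH
      have htail : (PySem.List.pyRange 0 ((s.length : Int) - 4) 4).flatMap
          (fun d => pvHexTerm (['0','b'] ++ PySem.List.slice s (some (d + 4)) (some (d + 4 + 4))))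
          = ((pvChunks (s.drop 4)).map (fun c => pvHexChars (pvBits c))).flatten := by
        rw [← hIH, ← hdlen]
        rw [List.flatMap_def, List.flatMap_def]
        congr 1
        apply List.map_congr_left
        intro d hd
        have hd0 : 0 ≤ d := ((PySem.List.mem_pyRange_iff_of_pos (by norm_num) d).mp hd).1
        congr 1
        rw [PySem.List.slice_toNat s (by omega) (by omega),
            PySem.List.slice_toNat (s.drop 4) hd0 (by omega), List.drop_drop]
        have e1 : (d + 4 + 4).toNat - (d + 4).toNat = (d + 4).toNat - d.toNat := by omega
        have e2 : (d + 4).toNat = d.toNat + 4 := by omega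
        rw [e1, e2, Nat.add_comm d.toNat 4]
      rw [htail]
      have hchunks : pvChunks s = (s.take 4) :: pvChunks (s.drop 4) := by
        cases s with
        | nil => cases hne rfl
        | cons a t => rw [pvChunks]
      rw [hchunks, pv_head_term s hbin hne]
      simp

theorem pv_join_all_bin (value : List Int)
    (h : (value.all (fun x => (PySem.Int.toChars x).all pvBinChar)) = true) :
    (pvJoinStr value).all pvBinChar = true := by
  unfold pvJoinStr
  rw [pv_join_nil_sep]
  simp only [List.all_eq_true] at *
  intro c hc
  rw [List.mem_flatten] at hc
  obtain ⟨l, hl, hcl⟩ := hc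
  rw [List.mem_map] at hl
  obtain ⟨x, hx, rfl⟩ := hl
  exact h x hx c hcl

-- ===== VERDICT (by name: the statement is the Claim_ definition above) =====
theorem hexify_spec : Claim_equal_hexify := by
  intro value _ hpre
  unfold Spec_hexify hexify hexify_alt
  dsimp only
  have hbin := pv_join_all_bin value hpre
  rw [pv_A_core (pvJoinStr value).length (pvJoinStr value) le_rfl hbin]
  have hb := pv_B_core (pvJoinStr value).length (pvJoinStr value) le_rfl hbin []
  unfold pvFinish at hb
  rw [hb, pv_join_nil_sep]
  simp
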